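-- pv_equiv track=rewrite | github.com/EdwardLeeMacau/genetic_algorithm | sga-python/deception.py | expandSchema
-- ===== SOURCE A (Python) =====
-- def expandSchema(schema: str):
--     stack  = [schema]
--     result = []
--
--     while not (len(stack) == 0):
--         s = stack.pop()
--
--         if (s.find('*') == -1):
--             result.append(s)
--         else:
--             stack.append(s.replace('*', '0', 1))
--             stack.append(s.replace('*', '1', 1))
--
--     return tuple(result)
-- ===== SOURCE B (Python) =====
-- def expandSchema(schema: str):
--     # One left-to-right pass over the schema, maintaining every concrete
--     # prefix built so far; '*' forks each prefix into '1' then '0'.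
--     results = ['']
--     for c in schema:
--         if c == '*':
--             results = [r + b for r in results for b in '10']
--         else:
--             results = [r + c for r in results]
--     return tuple(results)
-- ===== Notes on version B (the rewrite author's own statement) =====
-- stated objective: simpler
-- what changed: Replaces the explicit work-stack DFS with repeated first-wildcard replace by a single left-to-right pass that maintains the list of all concrete prefixes, forking each prefix at every wildcard.
import Mathlib
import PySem

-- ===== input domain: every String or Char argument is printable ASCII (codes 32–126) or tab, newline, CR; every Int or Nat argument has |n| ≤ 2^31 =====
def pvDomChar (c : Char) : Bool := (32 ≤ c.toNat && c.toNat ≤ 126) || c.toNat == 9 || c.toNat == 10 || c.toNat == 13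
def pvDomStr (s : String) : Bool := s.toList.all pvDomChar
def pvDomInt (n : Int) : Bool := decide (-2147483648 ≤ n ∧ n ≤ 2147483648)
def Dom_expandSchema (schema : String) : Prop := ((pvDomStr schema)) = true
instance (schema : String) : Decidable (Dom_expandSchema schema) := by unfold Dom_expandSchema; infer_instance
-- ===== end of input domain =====

-- B replaces A's explicit work-stack DFS (repeated first-'*' replace) by one
-- left-to-right pass that maintains all concrete prefixes, forking at each '*'.

-- ===== PORT A =====

/-- `s.replace('*', b, 1)` on the char list: replace the first `'*'` only.
    Exact hand port for a single-char pattern with count = 1. -/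
def pvRepl1 : List Char → Char → List Char
  | [], _ => []
  | c :: cs, b => if c = '*' then b :: cs else c :: pvRepl1 cs b

-- termination helper for the loop: replacing the first '*' lowers the '*'-count
theorem pvRepl1_count {cs : List Char} (h : '*' ∈ cs) (b : Char) (hb : b ≠ '*') :
    (pvRepl1 cs b).count '*' + 1 = cs.count '*' := by
  induction cs with
  | nil => cases h
  | cons c cs ih =>
    by_cases hc : c = '*'
    · subst hc
      simp [pvRepl1, hb]
    · rcases List.mem_cons.mp h with h1 | h2
      · exact absurd h1.symm hc
      · simp [pvRepl1, hc, ← ih h2]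

/-- The while loop of A; the Python stack's top (list end) is the head here. -/
def pvLoop : List String → List String → List String
  | [], result => result
  | s :: stack, result =>
    if PySem.Str.find s "*" = -1 then
      pvLoop stack (result ++ [s])
    else
      -- Python appends the '0'-replacement first, then the '1'-replacement,
      -- so the '1'-replacement is the new top (head).
      pvLoop (String.ofList (pvRepl1 s.toList '1') ::
              String.ofList (pvRepl1 s.toList '0') :: stack) result
  termination_by stack _ => (stack.map (fun s => 3 ^ (s.toList.count '*'))).sum
  decreasing_by
  · simp only [List.map_cons, List.sum_cons]
    have : 0 < 3 ^ (s.toList.count '*') := by positivity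
    omega
  · rename_i hfind
    have hmem : '*' ∈ s.toList := by
      have hfind' : PySem.Chars.find s.toList "*".toList ≠ -1 := by
        rwa [PySem.Str.find_eq] at hfind
      have hinf : ("*" : String).toList <:+: s.toList :=
        (PySem.Chars.find_ne_neg_one_iff _ _).mp hfind'
      exact (List.singleton_infix_iff _ _).mp hinf
    have h1 := pvRepl1_count hmem '1' (by decide)
    have h0 := pvRepl1_count hmem '0' (by decide)
    simp only [List.map_cons, List.sum_cons, String.toList_ofList]
    have hk : 1 ≤ s.toList.count '*' := by omega
    have e1 : (pvRepl1 s.toList '1').count '*' = s.toList.count '*' - 1 := by omega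
    have e0 : (pvRepl1 s.toList '0').count '*' = s.toList.count '*' - 1 := by omega
    rw [e1, e0]
    have hpow : 3 ^ (s.toList.count '*' - 1) + 3 ^ (s.toList.count '*' - 1)
        < 3 ^ (s.toList.count '*') := by
      obtain ⟨k, hk⟩ : ∃ k, s.toList.count '*' = k + 1 := ⟨_, (Nat.sub_add_cancel hk).symm⟩
      rw [hk]
      simp [Nat.pow_succ]
      have : 0 < 3 ^ k := by positivity
      omega
    omega

def expandSchema (schema : String) : List String := pvLoop [schema] []

-- ===== PORT B =====

/-- Port of B: one pass over the characters, keeping every concrete prefix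
    (as a char list; Python's string concatenation is list append here). -/
def expandSchema_alt (schema : String) : List String :=
  (schema.toList.foldl
    (fun results c =>
      if c = '*' then
        results.flatMap (fun r => ['1', '0'].map (fun b => r ++ [b]))
      else
        results.map (fun r => r ++ [c]))
    ([[]] : List (List Char))).map String.ofList

-- ===== PRECONDITION & SPEC =====
def Spec_expandSchema (schema : String) (out : List String) : Prop := out = expandSchema_alt schema
instance (schema : String) (out : List String) : Decidable (Spec_expandSchema schema out) := by unfold Spec_expandSchema; infer_instance

-- ===== CLAIM (what is proved, stated in full; the proofs are below) =====
def Claim_equal_expandSchema : Prop := ∀ (schema : String), Dom_expandSchema schema → Spec_expandSchema schema (expandSchema schema)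

-- ===== LEMMAS AND PROOFS =====

/-- Right-to-left characterisation of the set of expansions. -/
def pvE : List Char → List (List Char)
  | [] => [[]]
  | c :: cs =>
    if c = '*' then (pvE cs).map ('1' :: ·) ++ (pvE cs).map ('0' :: ·)
    else (pvE cs).map (c :: ·)

theorem pvE_foldl (cs : List Char) (acc : List (List Char)) :
    cs.foldl
      (fun results c =>
        if c = '*' then
          results.flatMap (fun r => ['1', '0'].map (fun b => r ++ [b]))
        else
          results.map (fun r => r ++ [c])) acc
    = acc.flatMap (fun r => (pvE cs).map (r ++ ·)) := by
  induction cs generalizing acc with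
  | nil => simp [pvE]
  | cons c cs ih =>
    rw [List.foldl_cons, ih]
    by_cases hc : c = '*'
    · subst hc
      simp [pvE, List.map_map, Function.comp_def]
      rw [List.flatMap_assoc]
      apply List.flatMap_congr
      intro r _
      simp
    · simp [pvE, hc, List.flatMap_map, List.map_map, Function.comp_def]

theorem pvE_no_star {cs : List Char} (h : '*' ∉ cs) : pvE cs = [cs] := by
  induction cs with
  | nil => rfl
  | cons c cs ih =>
    have hc : c ≠ '*' := fun e => h (e ▸ List.mem_cons_self)
    have := ih (fun m => h (List.mem_cons_of_mem _ m))
    simp [pvE, hc, this]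

theorem pvE_split {cs : List Char} (h : '*' ∈ cs) :
    pvE cs = pvE (pvRepl1 cs '1') ++ pvE (pvRepl1 cs '0') := by
  induction cs with
  | nil => cases h
  | cons c cs ih =>
    by_cases hc : c = '*'
    · subst hc
      simp [pvRepl1, pvE]
    · rcases List.mem_cons.mp h with h1 | h2
      · exact absurd h1.symm hc
      · simp [pvRepl1, hc, pvE, ih h2, List.map_append]

theorem pvLoop_eq (stack result : List String) :
    pvLoop stack result
      = result ++ stack.flatMap (fun s => (pvE s.toList).map String.ofList) := by
  fun_induction pvLoop stack result with
  | case1 result => simp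
  | case2 s stack result hfind ih =>
    have hmem : '*' ∉ s.toList := by
      intro hm
      rw [PySem.Str.find_eq] at hfind
      exact ((PySem.Chars.find_eq_neg_one_iff _ _).mp hfind)
        ((List.singleton_infix_iff _ _).mpr hm)
    rw [ih]
    simp [pvE_no_star hmem, List.append_assoc]
  | case3 s stack result hfind ih =>
    have hmem : '*' ∈ s.toList := by
      have hfind' : PySem.Chars.find s.toList "*".toList ≠ -1 := by
        rwa [PySem.Str.find_eq] at hfind
      have hinf : ("*" : String).toList <:+: s.toList :=
        (PySem.Chars.find_ne_neg_one_iff _ _).mp hfind'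
      exact (List.singleton_infix_iff _ _).mp hinf
    rw [ih]
    simp [pvE_split hmem, List.map_append, List.append_assoc]

-- ===== VERDICT (by name: the statement is the Claim_ definition above) =====
theorem expandSchema_spec : Claim_equal_expandSchema := by
  intro schema _
  unfold Spec_expandSchema expandSchema expandSchema_alt
  rw [pvLoop_eq, pvE_foldl]
  simp
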